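-- pv_equiv track=rewrite | github.com/nardogod/rag3det | src/ml/ner/extract_entities_from_corpus.py | _resolve_type_from_scores
-- ===== SOURCE A (Python) =====
-- from typing import Any, Dict, List, Optional, Tuple
--
-- TYPE_DESCONHECIDO = "DESCONHECIDO"
--
-- TYPE_ENTIDADE = "ENTIDADE"
--
-- def _resolve_type_from_scores(type_scores: Dict[str, int]) -> Tuple[str, str]:
--     """
--     Decisão final a partir da pontuação acumulada.
--     Retorna (tipo, confidence: "alta"|"media"|"revisar"|"baixa").
--     DESCONHECIDO com max >= 3 e tipo claramente líder → promove para esse tipo.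
--     """
--     if not type_scores or all(v == 0 for v in type_scores.values()):
--         return TYPE_ENTIDADE, "baixa"
--     tipo = max(type_scores, key=type_scores.get)
--     pts = type_scores[tipo]
--     sorted_vals = sorted(type_scores.values(), reverse=True)
--     second_best = sorted_vals[1] if len(sorted_vals) > 1 else 0
--     if pts >= 8:
--         return tipo, "alta"
--     if pts >= 5:
--         return tipo, "media"
--     # Reclassificação: 3 <= pts < 5 e líder claro (segundo pelo menos 2 abaixo) → promove
--     if 3 <= pts < 5 and pts >= second_best + 2:
--         return tipo, "revisar"
--     if pts >= 2:
--         return TYPE_DESCONHECIDO, "revisar"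
--     return TYPE_ENTIDADE, "baixa"
-- ===== SOURCE B (Python) =====
-- TYPE_DESCONHECIDO = "DESCONHECIDO"
-- TYPE_ENTIDADE = "ENTIDADE"
--
-- def _resolve_type_from_scores(type_scores):
--     # Single pass: track the leading (type, value), the runner-up value, and
--     # whether any score is non-zero; no max()+sorted() re-scans.
--     best_type = None
--     best = None
--     second = None
--     any_nonzero = False
--     for k, v in type_scores.items():
--         if v != 0:
--             any_nonzero = True
--         if best is None or v > best:
--             second = best
--             best = v
--             best_type = k
--         elif second is None or v > second:
--             second = v
--     if not any_nonzero:
--         return TYPE_ENTIDADE, "baixa"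
--     pts = best
--     second_best = second if second is not None else 0
--     if pts >= 8:
--         return best_type, "alta"
--     if pts >= 5:
--         return best_type, "media"
--     if 3 <= pts < 5 and pts >= second_best + 2:
--         return best_type, "revisar"
--     if pts >= 2:
--         return TYPE_DESCONHECIDO, "revisar"
--     return TYPE_ENTIDADE, "baixa"
-- ===== Notes on version B (the rewrite author's own statement) =====
-- stated objective: alternative
-- what changed: Replaces A's max(key=get) plus full descending sort of the values by a single left-to-right pass that maintains the leading (type, value), the runner-up value (counting duplicate maxima), and an any-nonzero flag; the guard and decision tree semantics are preserved.
import Mathlib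
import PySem

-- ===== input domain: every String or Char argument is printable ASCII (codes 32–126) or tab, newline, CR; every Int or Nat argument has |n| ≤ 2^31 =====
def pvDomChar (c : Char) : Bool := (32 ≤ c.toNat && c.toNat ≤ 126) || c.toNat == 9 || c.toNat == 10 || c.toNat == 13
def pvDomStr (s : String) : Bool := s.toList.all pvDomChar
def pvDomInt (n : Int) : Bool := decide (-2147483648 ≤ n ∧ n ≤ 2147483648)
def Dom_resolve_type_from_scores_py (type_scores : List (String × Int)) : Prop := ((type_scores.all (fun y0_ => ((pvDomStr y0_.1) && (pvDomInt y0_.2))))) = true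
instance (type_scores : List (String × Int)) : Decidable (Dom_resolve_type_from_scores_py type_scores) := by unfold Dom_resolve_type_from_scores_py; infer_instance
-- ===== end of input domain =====

-- B replaces A's max()-then-sorted() double scan of the score dict by a single pass
-- maintaining (best_type, best, second, any_nonzero); the final decision tree is kept.

-- ===== PORT A =====
-- type_scores.get(k) / type_scores[tipo]: first-match association lookup (Python dict get).
-- The looked-up keys always come from the dict itself, so under Pre_ (unique keys) the
-- lookup always succeeds and the `.getD 0` below is only a totalizing default.
def lkA (type_scores : List (String × Int)) (k : String) : Option Int :=
  List.lookup k type_scores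

def resolve_type_from_scores_py (type_scores : List (String × Int)) : String × String :=
  if type_scores = [] ∨ (type_scores.map Prod.snd).all (fun v => v == 0) then
    ("ENTIDADE", "baixa")
  else
    let tipo := (PySem.List.max? (type_scores.map Prod.fst)
        (fun k => (lkA type_scores k).getD 0)).getD ""
    let pts := (lkA type_scores tipo).getD 0
    let sorted_vals := PySem.List.sorted (type_scores.map Prod.snd) (fun v => v) true
    let second_best := if 1 < sorted_vals.length then PySem.List.pyGetD sorted_vals 1 0 else 0
    if pts ≥ 8 then (tipo, "alta")
    else if pts ≥ 5 then (tipo, "media")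
    else if 3 ≤ pts ∧ pts < 5 ∧ pts ≥ second_best + 2 then (tipo, "revisar")
    else if pts ≥ 2 then ("DESCONHECIDO", "revisar")
    else ("ENTIDADE", "baixa")

-- ===== PORT B =====
-- Loop body of Source B: state = (best_type, best, second, any_nonzero).
def altStep (st : Option String × Option Int × Option Int × Bool) (kv : String × Int) :
    Option String × Option Int × Option Int × Bool :=
  let nz := st.2.2.2 || (kv.2 != 0)
  match st.2.1 with
  | none => (some kv.1, some kv.2, none, nz)            -- best is None: second = best (None)
  | some b =>
    if b < kv.2 then (some kv.1, some kv.2, some b, nz) -- v > best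
    else if (match st.2.2.1 with | none => true | some s => s < kv.2) then
      (st.1, some b, some kv.2, nz)                     -- second is None or v > second
    else (st.1, some b, st.2.2.1, nz)

def resolve_type_from_scores_py_alt (type_scores : List (String × Int)) : String × String :=
  let st := type_scores.foldl altStep (none, none, none, false)
  if st.2.2.2 = false then ("ENTIDADE", "baixa")
  else
    let tipo := st.1.getD ""
    let pts := st.2.1.getD 0
    let second_best := st.2.2.1.getD 0
    if pts ≥ 8 then (tipo, "alta")
    else if pts ≥ 5 then (tipo, "media")
    else if 3 ≤ pts ∧ pts < 5 ∧ pts ≥ second_best + 2 then (tipo, "revisar")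
    else if pts ≥ 2 then ("DESCONHECIDO", "revisar")
    else ("ENTIDADE", "baixa")

-- ===== PRECONDITION & SPEC =====
-- Pre_ excludes association lists with duplicate keys: the Python argument is a dict,
-- which cannot hold two entries with the same key, so such lists represent no Python input.
def Pre_resolve_type_from_scores_py (type_scores : List (String × Int)) : Prop :=
  (type_scores.map Prod.fst).Nodup
instance (type_scores : List (String × Int)) : Decidable (Pre_resolve_type_from_scores_py type_scores) := by unfold Pre_resolve_type_from_scores_py; infer_instance

def pvWitness_resolve_type_from_scores_py : (List (String × Int)) := [("PESSOA", 4), ("ORG", 1)]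

def Spec_resolve_type_from_scores_py (type_scores : List (String × Int)) (out : String × String) : Prop := out = resolve_type_from_scores_py_alt type_scores
instance (type_scores : List (String × Int)) (out : String × String) : Decidable (Spec_resolve_type_from_scores_py type_scores out) := by unfold Spec_resolve_type_from_scores_py; infer_instance

-- ===== CLAIM (what is proved, stated in full; the proofs are below) =====
def Claim_equal_resolve_type_from_scores_py : Prop := ∀ (type_scores : List (String × Int)), Dom_resolve_type_from_scores_py type_scores → Pre_resolve_type_from_scores_py type_scores → Spec_resolve_type_from_scores_py type_scores (resolve_type_from_scores_py type_scores)

-- ===== LEMMAS AND PROOFS =====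

-- the "second best" of a multiset of values: maximum after removing one occurrence of the maximum
def sndSpec (vs : List Int) : Option Int :=
  match vs.max? with
  | none => none
  | some m => (vs.erase m).max?

theorem pymax_append {α κ : Type} [LT κ] [DecidableLT κ] (l : List α) (x : α) (key : α → κ) :
    PySem.List.max? (l ++ [x]) key =
      (match PySem.List.max? l key with
       | none => some x
       | some m => if key m < key x then some x else some m) := by
  unfold PySem.List.max?
  rw [List.foldl_append]
  rfl

theorem cmax_append (l : List Int) (x : Int) :
    (l ++ [x]).max? = some (match l.max? with | none => x | some m => max m x) := by
  cases l with
  | nil => rfl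
  | cons a as => simp [List.max?, List.foldl_append]

theorem lookup_of_mem (ts : List (String × Int)) (h : (ts.map Prod.fst).Nodup)
    (p : String × Int) (hp : p ∈ ts) : List.lookup p.1 ts = some p.2 := by
  induction ts with
  | nil => cases hp
  | cons q rest ih =>
    cases hp with
    | head => simp [List.lookup]
    | tail _ hp =>
      rw [List.map_cons, List.nodup_cons] at h
      have hne : (p.1 == q.1) = false :=
        beq_eq_false_iff_ne.mpr fun he => h.1 (he ▸ List.mem_map_of_mem hp)
      simp [List.lookup, hne, ih h.2 hp]

-- PySem.max? keyed by the value, projected to the value, is the running max of the values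
theorem pymax_map_snd (ts : List (String × Int)) :
    (PySem.List.max? ts (fun p => p.2)).map (fun p => p.2) = (ts.map Prod.snd).max? := by
  induction ts using List.reverseRecOn with
  | nil => rfl
  | append_singleton l x ih =>
    simp only [List.map_append, List.map_cons, List.map_nil]
    rw [pymax_append, cmax_append, ← ih]
    cases h : PySem.List.max? l (fun p => p.2) with
    | none => simp
    | some m =>
      by_cases hlt : m.2 < x.2 <;> simp [hlt] <;> omega

-- A's max(keys, key=get) is the key of the first value-maximal pair
theorem maxKeys (L : List (String × Int)) (ts : List (String × Int))
    (h : ∀ p ∈ ts, List.lookup p.1 L = some p.2) :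
    PySem.List.max? (ts.map Prod.fst) (fun k => (List.lookup k L).getD 0) =
      (PySem.List.max? ts (fun p => p.2)).map (fun p => p.1) := by
  induction ts using List.reverseRecOn with
  | nil => rfl
  | append_singleton l x ih =>
    have hl : ∀ p ∈ l, List.lookup p.1 L = some p.2 := fun p hp => h p (by simp [hp])
    simp only [List.map_append, List.map_cons, List.map_nil]
    rw [pymax_append, pymax_append, ih hl]
    cases hm : PySem.List.max? l (fun p => p.2) with
    | none => simp
    | some m =>
      have h1 : List.lookup m.1 L = some m.2 := hl m (PySem.List.max?_mem hm)
      have h2 : List.lookup x.1 L = some x.2 := h x (by simp)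
      simp [h1, h2]
      split <;> rfl

-- B's fold, characterized
theorem altFold (ts : List (String × Int)) :
    ts.foldl altStep (none, none, none, false) =
      ((PySem.List.max? ts (fun p => p.2)).map (fun p => p.1),
       (ts.map Prod.snd).max?,
       sndSpec (ts.map Prod.snd),
       (ts.map Prod.snd).any (fun v => v != 0)) := by
  induction ts using List.reverseRecOn with
  | nil => rfl
  | append_singleton l x ih =>
    rw [List.foldl_append, ih]
    simp only [List.map_append, List.map_cons, List.map_nil, List.any_append]
    rw [pymax_append, cmax_append]
    cases hm : PySem.List.max? l (fun p => p.2) with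
    | none =>
      have hl : l = [] := (PySem.List.max?_eq_none_iff l _).mp hm
      subst hl
      simp [altStep, sndSpec]
    | some m =>
      have hv : (l.map Prod.snd).max? = some m.2 := by rw [← pymax_map_snd, hm]; rfl
      have hmem : m.2 ∈ l.map Prod.snd := List.max?_mem hv
      by_cases hlt : m.2 < x.2
      · have hnx : x.2 ∉ l.map Prod.snd := by
          intro hx
          have := (List.max?_eq_some_iff.mp hv).2 x.2 hx
          omega
        have hmax : max m.2 x.2 = x.2 := by omega
        have her : (l.map Prod.snd ++ [x.2]).erase x.2 = l.map Prod.snd := by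
          rw [List.erase_append, if_neg hnx]
          simp
        simp [List.foldl_cons, altStep, sndSpec, cmax_append, hv, hmax, her, hlt]
      · have hmax : max m.2 x.2 = m.2 := by omega
        have her : (l.map Prod.snd ++ [x.2]).erase m.2 = (l.map Prod.snd).erase m.2 ++ [x.2] := by
          rw [List.erase_append, if_pos hmem]
        cases hs : ((l.map Prod.snd).erase m.2).max? with
        | none => simp [List.foldl_cons, altStep, sndSpec, cmax_append, hv, hmax, her, hlt, hs]
        | some s =>
          by_cases hsx : s < x.2
          · simp [List.foldl_cons, altStep, sndSpec, cmax_append, hv, hmax, her, hlt, hs, hsx]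
            omega
          · simp [List.foldl_cons, altStep, sndSpec, cmax_append, hv, hmax, her, hlt, hs, hsx]
            omega

theorem max?_perm {l₁ l₂ : List Int} (h : l₁.Perm l₂) : l₁.max? = l₂.max? := by
  cases hm : l₂.max? with
  | none =>
    rw [List.max?_eq_none_iff] at hm ⊢
    exact List.Perm.eq_nil (hm ▸ h)
  | some m =>
    rw [List.max?_eq_some_iff] at hm ⊢
    exact ⟨h.mem_iff.mpr hm.1, fun b hb => hm.2 b (h.mem_iff.mp hb)⟩

-- A's sorted-descending second value equals the erase-one-max maximum
theorem sorted_second (vs : List Int) :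
    (if 1 < (PySem.List.sorted vs (fun v => v) true).length
     then PySem.List.pyGetD (PySem.List.sorted vs (fun v => v) true) 1 0 else 0) =
      (sndSpec vs).getD 0 := by
  rcases h : PySem.List.sorted vs (fun v => v) true with _ | ⟨a, _ | ⟨b, t⟩⟩
  · have hv : vs = [] := (PySem.List.sorted_eq_nil_iff vs _ _).mp h
    subst hv
    rfl
  · have hperm : [a].Perm vs := h ▸ PySem.List.sorted_perm vs (fun v => v) true
    have hv : vs = [a] := List.Perm.eq_singleton hperm.symm
    subst hv
    simp [sndSpec]
  · have hperm : (a :: b :: t).Perm vs := h ▸ PySem.List.sorted_perm vs (fun v => v) true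
    have hge : ∀ y ∈ vs, y ≤ a := PySem.List.key_head_sorted_rev_ge vs (fun v => v) h
    have hmax : vs.max? = some a :=
      List.max?_eq_some_iff.mpr ⟨hperm.subset (by simp), hge⟩
    have hpw := PySem.List.sorted_pairwise_rev vs (fun v => v)
    rw [h] at hpw
    have hb : ∀ y ∈ b :: t, y ≤ b := by
      rcases List.pairwise_cons.mp hpw with ⟨-, hpw2⟩
      rcases List.pairwise_cons.mp hpw2 with ⟨hbt, -⟩
      intro y hy
      rcases List.mem_cons.mp hy with rfl | hy
      · exact le_refl y
      · exact hbt y hy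
    have herase : (vs.erase a).Perm (b :: t) := by
      have := (hperm.symm.erase a)
      rwa [List.erase_cons_head] at this
    have h2 : (vs.erase a).max? = some b :=
      (max?_perm herase).trans (List.max?_eq_some_iff.mpr ⟨by simp, hb⟩)
    rw [if_pos (by simp)]
    rw [show (1 : Int) = ((1 : Nat) : Int) from rfl, PySem.List.pyGetD_natCast]
    simp [sndSpec, hmax, h2]

theorem main_thm (ts : List (String × Int)) (hpre : (ts.map Prod.fst).Nodup) :
    resolve_type_from_scores_py ts = resolve_type_from_scores_py_alt ts := by
  unfold resolve_type_from_scores_py resolve_type_from_scores_py_alt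
  rw [altFold]
  by_cases hz : (ts.map Prod.snd).any (fun v => v != 0) = false
  · have hall : (ts = [] ∨ (ts.map Prod.snd).all (fun v => v == 0)) := by
      right
      simp only [List.any_eq_false] at hz
      simp only [List.all_eq_true]
      intro v hv
      simpa using hz v hv
    rw [if_pos hall, if_pos hz]
  · have hne : ts ≠ [] := by
      rintro rfl
      simp at hz
    have hguard : ¬ (ts = [] ∨ (ts.map Prod.snd).all (fun v => v == 0)) := by
      rintro (rfl | hall)
      · simp at hz
      · apply hz
        simp only [List.any_eq_false]
        simp only [List.all_eq_true] at hall
        intro v hv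
        simpa using hall v hv
    rw [if_neg hguard, if_neg hz]
    cases hm : PySem.List.max? ts (fun p => p.2) with
    | none => exact absurd ((PySem.List.max?_eq_none_iff ts _).mp hm) hne
    | some m =>
      have hlk : ∀ p ∈ ts, List.lookup p.1 ts = some p.2 := fun p hp => lookup_of_mem ts hpre p hp
      have htipo : PySem.List.max? (ts.map Prod.fst) (fun k => (lkA ts k).getD 0) = some m.1 := by
        unfold lkA
        rw [maxKeys ts ts hlk, hm]
        rfl
      have hpts : lkA ts m.1 = some m.2 := hlk m (PySem.List.max?_mem hm)
      have hv : (ts.map Prod.snd).max? = some m.2 := by rw [← pymax_map_snd, hm]; rfl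
      simp only [htipo, hpts, hv, sorted_second, Option.getD_some, Option.map_some]

-- ===== VERDICT (by name: the statement is the Claim_ definition above) =====
theorem resolve_type_from_scores_py_spec : Claim_equal_resolve_type_from_scores_py := by
  intro ts _ hpre
  unfold Spec_resolve_type_from_scores_py
  exact main_thm ts hpre
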